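-- pv_equiv track=rewrite | github.com/JhonJHerrera/NOAA---weather-station-adquisition | chll_pipeline.py | pick_best_timeliness_per_entry
-- ===== SOURCE A (Python) =====
-- from typing import List, Optional, Tuple
--
-- def extract_entry_name_from_pid(pid: str) -> Optional[str]:
--     """
--     Extract the timestamp-like entry_name from the product_id.
--     For S3 OLCI IDs it is typically at index 7 after splitting by '_'.
--     """
--     parts = str(pid).split("_")
--     return parts[7] if len(parts) > 7 else None
--
-- def timeliness_rank(pid: str) -> int:
--     """
--     Rank timeliness from best to worst:
--     NT (non-time-critical) > STC/ST > NR/NRT.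
--     Returns higher number for better timeliness.
--     """
--     p = pid.upper()
--     if "_O_NT_" in p:                       # final
--         return 3
--     if "_O_STC_" in p or "_O_ST_" in p:     # final-ish
--         return 2
--     if "_O_NR_" in p or "_O_NRT_" in p:     # near-real-time
--         return 1
--     return 0
--
-- def pick_best_timeliness_per_entry(products) -> list:
--     """
--     Collapse multiple products with the same entry_name, keeping only the one
--     with the best timeliness (highest timeliness_rank).
--     """
--     best = {}  # entry_name -> (rank, product)
--     for prod in products:
--         pid = getattr(prod, "_id", str(prod))
--         entry = extract_entry_name_from_pid(pid)
--         if not entry: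
--             continue
--         r = timeliness_rank(pid)
--         prev = best.get(entry)
--         if (prev is None) or (r > prev[0]):
--             best[entry] = (r, prod)
--
--     # Keep chronological order by entry_name if it looks like YYYYMMDDTHHMMSS
--     return [bp[1] for entry, bp in sorted(best.items(), key=lambda kv: kv[0])]
-- ===== SOURCE B (Python) =====
-- def _rank(pid):
--     p = pid.upper()
--     if "_O_NT_" in p:
--         return 3
--     if "_O_STC_" in p or "_O_ST_" in p:
--         return 2
--     if "_O_NR_" in p or "_O_NRT_" in p:
--         return 1
--     return 0
--
--
-- def _entry(pid):
--     parts = str(pid).split("_")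
--     return parts[7] if len(parts) > 7 else None
--
--
-- def pick_best_timeliness_per_entry(products) -> list:
--     # Collect (entry, product) pairs for products with a truthy entry name,
--     # then for each distinct entry (in sorted order) scan the pairs once to
--     # pick the first product of maximal timeliness rank.
--     pairs = []
--     for prod in products:
--         pid = str(prod)
--         e = _entry(pid)
--         if e:
--             pairs.append((e, prod))
--     out = []
--     for entry in sorted({e for e, _ in pairs}):
--         best = None
--         for e, prod in pairs:
--             if e == entry:
--                 r = _rank(str(prod))
--                 if best is None or r > best[0]:
--                     best = (r, prod)
--         out.append(best[1])
--     return out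
-- ===== Notes on version B (the rewrite author's own statement) =====
-- stated objective: alternative
-- what changed: Replaces the rank-carrying dict plus items-sort with a flat (entry, product) pair list: the distinct entries are sorted first and each entry's winner is found by a per-entry scan of the pairs, so no dict and no (rank, product) state survive the first pass.
import Mathlib
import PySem

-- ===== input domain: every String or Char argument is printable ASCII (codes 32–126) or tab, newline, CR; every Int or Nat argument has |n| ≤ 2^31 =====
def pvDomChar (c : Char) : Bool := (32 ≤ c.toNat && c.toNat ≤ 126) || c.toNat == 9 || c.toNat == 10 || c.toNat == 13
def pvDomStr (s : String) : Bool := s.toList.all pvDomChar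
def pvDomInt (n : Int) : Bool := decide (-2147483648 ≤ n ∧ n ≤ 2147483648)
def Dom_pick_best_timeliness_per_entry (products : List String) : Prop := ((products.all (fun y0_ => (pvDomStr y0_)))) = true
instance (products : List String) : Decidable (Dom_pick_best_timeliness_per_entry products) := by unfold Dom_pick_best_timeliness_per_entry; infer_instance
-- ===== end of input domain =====

-- B replaces A's rank-carrying dict + items-sort with a flat (entry, product) pair
-- list, sorted distinct entries, and a per-entry scan (alternative decomposition).

-- ===== PORT A =====

-- parts[7] if len(parts) > 7 else None, parts = pid.split("_")
def pvEntry? (pid : String) : Option String :=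
  let parts := (PySem.Str.split? pid "_").getD []  -- sep "_" is nonempty: split? is `some` here, getD is exact
  if 7 < parts.length then PySem.List.pyGet? parts 7 else none

def pvRank (pid : String) : Int :=
  let p := PySem.Str.upper pid
  if PySem.Str.isIn "_O_NT_" p then 3
  else if PySem.Str.isIn "_O_STC_" p || PySem.Str.isIn "_O_ST_" p then 2
  else if PySem.Str.isIn "_O_NR_" p || PySem.Str.isIn "_O_NRT_" p then 1
  else 0

def pvStepDict (best : PySem.Dict String (Int × String)) (prod : String) :
    PySem.Dict String (Int × String) :=
  match pvEntry? prod with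
  | none => best
  | some e =>
    if e = "" then best
    else
      let r := pvRank prod
      match best.get? e with
      | none => best.insert e (r, prod)
      | some prev => if prev.1 < r then best.insert e (r, prod) else best

def pick_best_timeliness_per_entry (products : List String) : List String :=
  let best := products.foldl pvStepDict PySem.Dict.empty
  (PySem.List.sorted best.items (fun kv => kv.1) false).map (fun kv => kv.2.2)

-- ===== PORT B =====

def pvPairStep (acc : List (String × String)) (prod : String) : List (String × String) :=
  match pvEntry? prod with
  | none => acc
  | some e => if e = "" then acc else acc ++ [(e, prod)]

def pvBestStep (entry : String) (best : Option (Int × String)) (ep : String × String) :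
    Option (Int × String) :=
  if ep.1 = entry then
    let r := pvRank ep.2
    match best with
    | none => some (r, ep.2)
    | some prev => if prev.1 < r then some (r, ep.2) else some prev
  else best

def pick_best_timeliness_per_entry_alt (products : List String) : List String :=
  let pairs := products.foldl pvPairStep []
  let entries := PySem.List.sorted (PySem.Set.ofList (pairs.map (·.1))) (fun x => x) false
  entries.map (fun entry =>
    match pairs.foldl (pvBestStep entry) none with
    | some b => b.2
    | none => "")

-- ===== PRECONDITION & SPEC =====
def Spec_pick_best_timeliness_per_entry (products : List String) (out : List String) : Prop := out = pick_best_timeliness_per_entry_alt products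
instance (products : List String) (out : List String) : Decidable (Spec_pick_best_timeliness_per_entry products out) := by unfold Spec_pick_best_timeliness_per_entry; infer_instance

-- ===== CLAIM (what is proved, stated in full; the proofs are below) =====
def Claim_equal_pick_best_timeliness_per_entry : Prop := ∀ (products : List String), Dom_pick_best_timeliness_per_entry products → Spec_pick_best_timeliness_per_entry products (pick_best_timeliness_per_entry products)

-- ===== LEMMAS AND PROOFS =====

-- the (entry, product) pair a single product contributes, if any
def pvPair? (prod : String) : Option (String × String) :=
  match pvEntry? prod with
  | none => none
  | some e => if e = "" then none else some (e, prod)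

-- A's dict update for one contributing pair
def pvDictUpd (d : PySem.Dict String (Int × String)) (ep : String × String) :
    PySem.Dict String (Int × String) :=
  let r := pvRank ep.2
  match d.get? ep.1 with
  | none => d.insert ep.1 (r, ep.2)
  | some prev => if prev.1 < r then d.insert ep.1 (r, ep.2) else d

theorem pvPairStep_eq (acc : List (String × String)) (p : String) :
    pvPairStep acc p = acc ++ (pvPair? p).toList := by
  unfold pvPairStep pvPair?
  cases pvEntry? p with
  | none => simp
  | some e => by_cases he : e = "" <;> simp [he]

theorem pvStepDict_eq (d : PySem.Dict String (Int × String)) (p : String) :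
    pvStepDict d p = match pvPair? p with | none => d | some ep => pvDictUpd d ep := by
  unfold pvStepDict pvPair? pvDictUpd
  cases pvEntry? p with
  | none => rfl
  | some e => by_cases he : e = "" <;> simp [he]

theorem pvPairStep_foldl (l : List String) (acc : List (String × String)) :
    l.foldl pvPairStep acc = acc ++ l.filterMap pvPair? := by
  induction l generalizing acc with
  | nil => simp
  | cons p t ih =>
    rw [List.foldl_cons, pvPairStep_eq, ih, List.filterMap_cons]
    cases pvPair? p <;> simp

-- per-key content of A's dict fold
theorem pvDict_get? (l : List String) (d : PySem.Dict String (Int × String)) (k : String) :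
    (l.foldl pvStepDict d).get? k =
      ((l.filterMap pvPair?).filter (fun ep => ep.1 == k)).foldl (pvBestStep k) (d.get? k) := by
  induction l generalizing d with
  | nil => simp
  | cons p t ih =>
    rw [List.foldl_cons, pvStepDict_eq, List.filterMap_cons]
    cases h : pvPair? p with
    | none => exact ih d
    | some ep =>
      obtain ⟨e, q⟩ := ep
      rw [List.filter_cons]
      by_cases hk : e = k
      · subst hk
        simp only [beq_self_eq_true, if_true]
        unfold pvDictUpd
        rw [ih]
        cases hg : d.get? e with
        | none =>
          simp [pvBestStep, PySem.Dict.get?_insert_self]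
        | some prev =>
          by_cases hr : prev.1 < pvRank q
          · simp [pvBestStep, hr, PySem.Dict.get?_insert_self]
          · simp [pvBestStep, hg, hr]
      · have hbeq : (e == k) = false := by simp [hk]
        simp only [hbeq, Bool.false_eq_true, if_false]
        unfold pvDictUpd
        rw [ih]
        cases hg : d.get? e with
        | none =>
          simp [PySem.Dict.get?_insert_of_ne _ _ (Ne.symm hk)]
        | some prev =>
          by_cases hr : prev.1 < pvRank q
          · simp [hr, PySem.Dict.get?_insert_of_ne _ _ (Ne.symm hk)]
          · simp [hr]

-- one dict update never removes keys, adds at most its own entry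
theorem pvDictUpd_keys (d : PySem.Dict String (Int × String)) (ep : String × String) :
    (pvDictUpd d ep).keys = PySem.Set.add d.keys ep.1 := by
  have hadd_mem : ep.1 ∈ d.keys → PySem.Set.add d.keys ep.1 = d.keys := by
    intro hm
    rw [PySem.Set.add, if_pos]
    rw [PySem.Set.contains]
    simpa using hm
  have hins : ∀ v, (d.insert ep.1 v).keys = PySem.Set.add d.keys ep.1 := by
    intro v
    by_cases hc : d.contains ep.1 = true
    · rw [hadd_mem (by simpa [PySem.Dict.contains_eq_decide_mem_keys] using hc)]
      simp only [PySem.Dict.keys, PySem.Dict.items_insert, hc, if_true, List.map_map]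
      apply List.map_congr_left
      intro a _
      by_cases hae : a.1 == ep.1 <;> simp_all
    · have hm : ep.1 ∉ d.keys := by
        simpa [PySem.Dict.contains_eq_decide_mem_keys] using hc
      rw [PySem.Set.add, if_neg (by rw [PySem.Set.contains]; simpa using hm)]
      simp [PySem.Dict.keys, PySem.Dict.items_insert, hc]
  unfold pvDictUpd
  cases hg : d.get? ep.1 with
  | none => exact hins _
  | some prev =>
    by_cases hr : prev.1 < pvRank ep.2
    · simp only [hr, if_true]; exact hins _
    · simp only [hr, if_false]
      have hm : ep.1 ∈ d.keys := by
        have : d.contains ep.1 = true := by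
          rw [PySem.Dict.contains_eq_isSome_get?, hg]; rfl
        simpa [PySem.Dict.contains_eq_decide_mem_keys] using this
      exact (hadd_mem hm).symm

-- keys of A's dict fold = set of contributed entries, in first-occurrence order
theorem pvDict_keys (l : List String) (d : PySem.Dict String (Int × String)) :
    (l.foldl pvStepDict d).keys = PySem.Set.update d.keys ((l.filterMap pvPair?).map (·.1)) := by
  induction l generalizing d with
  | nil => simp [PySem.Set.update]
  | cons p t ih =>
    rw [List.foldl_cons, pvStepDict_eq, List.filterMap_cons]
    cases h : pvPair? p with
    | none => exact ih d
    | some ep =>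
      rw [List.map_cons, ih, pvDictUpd_keys]
      simp [PySem.Set.update]

-- ===== VERDICT (by name: the statement is the Claim_ definition above) =====
theorem pick_best_timeliness_per_entry_spec : Claim_equal_pick_best_timeliness_per_entry := by
  intro products _
  show _ = _
  unfold pick_best_timeliness_per_entry pick_best_timeliness_per_entry_alt
  have hpairs : products.foldl pvPairStep [] = products.filterMap pvPair? := by
    simpa using pvPairStep_foldl products []
  rw [hpairs]
  dsimp only
  set P := products.filterMap pvPair? with hP
  set d := products.foldl pvStepDict (PySem.Dict.empty) with hd
  have hkeys : d.keys = PySem.Set.ofList (P.map (·.1)) := by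
    rw [hd, pvDict_keys, PySem.Dict.keys_empty, PySem.Set.ofList_eq_foldl]
    rfl
  have hnd : d.keys.Nodup := hkeys ▸ PySem.Set.nodup_ofList _
  have hget : ∀ k, d.get? k = P.foldl (pvBestStep k) none := by
    intro k
    have hfn : (fun (x : Option (Int × String)) (y : String × String) =>
        if (y.1 == k) = true then pvBestStep k x y else x) = pvBestStep k := by
      funext x y
      by_cases h : y.1 = k <;> simp [pvBestStep, h]
    rw [hd, pvDict_get?, PySem.Dict.get?_empty, List.foldl_filter, hfn]
  have hsortkeys : PySem.List.sorted d.items (fun kv => kv.1) false =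
      (PySem.List.sorted d.keys (fun x => x) false).map
        (fun k => (k, d.getD k ((0 : Int), ""))) := by
    apply PySem.List.sorted_eq_of_perm_of_pairwise_lt
    · rw [PySem.Dict.items_eq_map_keys d hnd ((0 : Int), "")]
      exact (PySem.List.sorted_perm d.keys (fun x => x) false).map _
    · rw [List.pairwise_map]
      rw [hkeys]
      exact PySem.List.sorted_ofList_pairwise_lt _
  rw [hsortkeys, List.map_map, hkeys]
  apply List.map_congr_left
  intro k _
  simp only [Function.comp]
  rw [PySem.Dict.getD_eq_get?_getD, hget k]
  cases P.foldl (pvBestStep k) none <;> rfl
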